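-- pv_equiv track=rewrite | github.com/sanantoha/algos | arrays/valid_starting_city.py | valid_starting_city1
-- ===== SOURCE A (Python) =====
-- def valid_starting_city1(distances, fuel, mpg):
--     remain_distance = 0
--     min_remain_distance = 0
--     min_idx = 0
--
--     for idx in range(1, len(fuel)):
--         remain_distance += fuel[idx - 1] * mpg - distances[idx - 1]
--         if remain_distance < min_remain_distance:
--             min_remain_distance = remain_distance
--             min_idx = idx
--
--     return min_idx
-- ===== SOURCE B (Python) =====
-- def valid_starting_city1(distances, fuel, mpg):
--     cities = [(0, 0)]
--     for i in range(len(fuel) - 1):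
--         cities.append((cities[-1][0] + fuel[i] * mpg - distances[i], i + 1))
--     return sorted(cities, key=lambda c: c[0])[0][1]
-- ===== Notes on version B (the rewrite author's own statement) =====
-- stated objective: alternative
-- what changed: A's single fused loop with a running minimum and its index is replaced by building a table of (prefix-remaining-fuel, city) pairs and stably sorting it by the fuel value, returning the first city of the sorted table (stability reproduces the first-occurrence tie-break).
import Mathlib
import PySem

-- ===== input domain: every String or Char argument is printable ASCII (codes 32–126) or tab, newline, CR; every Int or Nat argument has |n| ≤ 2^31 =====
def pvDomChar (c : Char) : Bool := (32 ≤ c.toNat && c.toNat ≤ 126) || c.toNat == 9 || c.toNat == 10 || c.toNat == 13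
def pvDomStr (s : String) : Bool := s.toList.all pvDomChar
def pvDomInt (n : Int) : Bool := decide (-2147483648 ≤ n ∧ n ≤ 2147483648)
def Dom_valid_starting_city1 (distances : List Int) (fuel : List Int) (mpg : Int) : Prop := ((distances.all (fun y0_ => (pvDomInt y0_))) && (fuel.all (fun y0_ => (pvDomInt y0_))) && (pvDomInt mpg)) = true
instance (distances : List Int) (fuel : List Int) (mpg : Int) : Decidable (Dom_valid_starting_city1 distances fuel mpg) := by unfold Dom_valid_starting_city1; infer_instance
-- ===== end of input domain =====

-- B replaces A's fused running-min loop by building a (prefix value, city) pair table and stably sorting it by value, returning the first city of the sorted table (objective: alternative algorithm, same answer via sort stability).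

-- ===== PORT A =====
def valid_starting_city1 (distances : List Int) (fuel : List Int) (mpg : Int) : Int :=
  let st := (PySem.List.pyRange 1 (fuel.length : Int) 1).foldl
    (fun (st : Int × Int × Int) idx =>
      let rd := st.1 + PySem.List.pyGetD fuel (idx - 1) 0 * mpg - PySem.List.pyGetD distances (idx - 1) 0
      if rd < st.2.1 then (rd, rd, idx) else (rd, st.2.1, st.2.2))
    (0, 0, 0)
  st.2.2

-- ===== PORT B =====
-- cities is never empty, so Python's cities[-1] and sorted(...)[0] always succeed; they are ported with pyGetD.
def valid_starting_city1_alt (distances : List Int) (fuel : List Int) (mpg : Int) : Int :=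
  let cities := (PySem.List.pyRange 0 ((fuel.length : Int) - 1) 1).foldl
    (fun (c : List (Int × Int)) i =>
      c ++ [((PySem.List.pyGetD c (-1) (0, 0)).1 + PySem.List.pyGetD fuel i 0 * mpg - PySem.List.pyGetD distances i 0, i + 1)])
    [(0, 0)]
  (PySem.List.pyGetD (PySem.List.sorted cities (fun c => c.1)) 0 (0, 0)).2

-- ===== PRECONDITION & SPEC =====
-- A raises IndexError when distances has fewer than len(fuel)-1 entries (it reads distances[idx-1] for idx up to len(fuel)-1); B raises there too.
def Pre_valid_starting_city1 (distances : List Int) (fuel : List Int) (mpg : Int) : Prop :=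
  (fuel.length : Int) - 1 ≤ (distances.length : Int)
instance (distances : List Int) (fuel : List Int) (mpg : Int) : Decidable (Pre_valid_starting_city1 distances fuel mpg) := by unfold Pre_valid_starting_city1; infer_instance
def pvWitness_valid_starting_city1 : List Int × List Int × Int := ([3, 1, 2], [1, 2, 3], 2)

def Spec_valid_starting_city1 (distances : List Int) (fuel : List Int) (mpg : Int) (out : Int) : Prop := out = valid_starting_city1_alt distances fuel mpg
instance (distances : List Int) (fuel : List Int) (mpg : Int) (out : Int) : Decidable (Spec_valid_starting_city1 distances fuel mpg out) := by unfold Spec_valid_starting_city1; infer_instance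

-- ===== CLAIM (what is proved, stated in full; the proofs are below) =====
def Claim_equal_valid_starting_city1 : Prop := ∀ (distances : List Int) (fuel : List Int) (mpg : Int), Dom_valid_starting_city1 distances fuel mpg → Pre_valid_starting_city1 distances fuel mpg → Spec_valid_starting_city1 distances fuel mpg (valid_starting_city1 distances fuel mpg)

-- ===== LEMMAS AND PROOFS =====

-- gain of city k
def pvG (distances : List Int) (fuel : List Int) (mpg : Int) (k : Nat) : Int :=
  fuel.getD k 0 * mpg - distances.getD k 0

-- prefix "remaining distance" before city k
def pvQ (distances : List Int) (fuel : List Int) (mpg : Int) : Nat → Int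
  | 0 => 0
  | k + 1 => pvQ distances fuel mpg k + pvG distances fuel mpg k

-- running (min, first argmin) of pvQ on 0..m, exactly A's update rule
def pvMA (distances : List Int) (fuel : List Int) (mpg : Int) : Nat → Int × Nat
  | 0 => (0, 0)
  | m + 1 =>
    let p := pvMA distances fuel mpg m
    if pvQ distances fuel mpg (m + 1) < p.1 then (pvQ distances fuel mpg (m + 1), m + 1) else p

-- the pair table of the first m+1 values of pvQ with their city indices
def pvC (distances : List Int) (fuel : List Int) (mpg : Int) (m : Nat) : List (Int × Int) :=
  (List.range (m + 1)).map (fun k => (pvQ distances fuel mpg k, (k : Int)))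

theorem pvC_succ (distances fuel : List Int) (mpg : Int) (m : Nat) :
    pvC distances fuel mpg (m + 1) = pvC distances fuel mpg m ++ [(pvQ distances fuel mpg (m + 1), ((m : Int) + 1))] := by
  simp [pvC, List.range_succ]

-- A's fold over range(1, m+1) computes (Q m, Min m, Arg m)
theorem pvA_fold (distances fuel : List Int) (mpg : Int) (m : Nat) :
    (PySem.List.pyRange 1 ((m : Int) + 1) 1).foldl
      (fun (st : Int × Int × Int) idx =>
        let rd := st.1 + PySem.List.pyGetD fuel (idx - 1) 0 * mpg - PySem.List.pyGetD distances (idx - 1) 0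
        if rd < st.2.1 then (rd, rd, idx) else (rd, st.2.1, st.2.2))
      (0, 0, 0)
    = (pvQ distances fuel mpg m, (pvMA distances fuel mpg m).1, ((pvMA distances fuel mpg m).2 : Int)) := by
  induction m with
  | zero =>
    rw [PySem.List.pyRange_one_eq_nil (by omega)]
    simp [pvQ, pvMA]
  | succ m ih =>
    have hsplit : PySem.List.pyRange 1 ((m : Int) + 1 + 1) 1
        = PySem.List.pyRange 1 ((m : Int) + 1) 1 ++ [(m : Int) + 1] := by
      exact PySem.List.pyRange_one_succ_right (by omega)
    push_cast
    rw [hsplit, List.foldl_append, ih]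
    have hidx : ((m : Int) + 1) - 1 = (m : Nat) := by omega
    simp only [List.foldl_cons, List.foldl_nil, hidx, PySem.List.pyGetD_natCast]
    have hs : pvQ distances fuel mpg m + fuel.getD m 0 * mpg - distances.getD m 0
        = pvQ distances fuel mpg (m + 1) := by
      simp [pvQ, pvG]; ring
    rw [hs]
    simp only [pvMA]
    split <;> simp

-- B's fold builds the pair table
theorem pvB_fold (distances fuel : List Int) (mpg : Int) (m : Nat) :
    (PySem.List.pyRange 0 (m : Int) 1).foldl
      (fun (c : List (Int × Int)) i =>
        c ++ [((PySem.List.pyGetD c (-1) (0, 0)).1 + PySem.List.pyGetD fuel i 0 * mpg - PySem.List.pyGetD distances i 0, i + 1)])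
      [(0, 0)]
    = pvC distances fuel mpg m := by
  induction m with
  | zero =>
    rw [PySem.List.pyRange_one_eq_nil (by omega)]
    simp [pvC, pvQ]
  | succ m ih =>
    have hsplit : PySem.List.pyRange 0 ((m : Int) + 1) 1
        = PySem.List.pyRange 0 (m : Int) 1 ++ [(m : Int)] := by
      exact PySem.List.pyRange_one_succ_right (by omega)
    push_cast
    rw [hsplit, List.foldl_append, ih, pvC_succ]
    simp only [List.foldl_cons, List.foldl_nil, PySem.List.pyGetD_natCast]
    congr 1
    have hlast : PySem.List.pyGetD (pvC distances fuel mpg m) (-1) (0, 0)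
        = (pvQ distances fuel mpg m, (m : Int)) := by
      rcases Nat.eq_zero_or_pos m with h | h
      · subst h; simp [pvC, pvQ]; rfl
      · obtain ⟨m', rfl⟩ := Nat.exists_eq_succ_of_ne_zero (Nat.pos_iff_ne_zero.mp h)
        rw [pvC_succ]
        exact PySem.List.pyGetD_neg_one_append_singleton _ _ _
    rw [hlast]
    have hs : pvQ distances fuel mpg m + fuel.getD m 0 * mpg - distances.getD m 0
        = pvQ distances fuel mpg (m + 1) := by
      simp [pvQ, pvG]; ring
    rw [hs]

-- head of insertBy depends only on the old head
theorem pvHead_insertBy {α : Type} (before : α → α → Bool) (x : α) (ys : List α) :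
    (PySem.List.insertBy before x ys).head? =
      match ys.head? with
      | none => some x
      | some h => if before x h then some x else some h := by
  cases ys with
  | nil => simp [PySem.List.insertBy]
  | cons h t =>
    simp only [PySem.List.insertBy, List.head?_cons]
    split <;> simp

-- head of the stably value-sorted pair table follows exactly A's running-min rule
theorem pvSorted_head (distances fuel : List Int) (mpg : Int) (m : Nat) :
    (PySem.List.sorted (pvC distances fuel mpg m) (fun c => c.1)).head?
      = some ((pvMA distances fuel mpg m).1, ((pvMA distances fuel mpg m).2 : Int)) := by
  induction m with
  | zero =>
    simp [pvC, pvMA, pvQ, PySem.List.sorted_eq_foldl_insertBy, PySem.List.insertBy]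
  | succ m ih =>
    rw [PySem.List.sorted_eq_foldl_insertBy] at ih ⊢
    rw [pvC_succ, List.foldl_append]
    simp only [List.foldl_cons, List.foldl_nil]
    rw [pvHead_insertBy, ih]
    simp only [pvMA]
    split
    · rename_i hlt
      rw [if_pos (by simpa using hlt)]
      rfl
    · rename_i hnlt
      rw [if_neg (by simpa using hnlt)]

-- ===== VERDICT (by name: the statement is the Claim_ definition above) =====
theorem valid_starting_city1_spec : Claim_equal_valid_starting_city1 := by
  intro distances fuel mpg _ _
  unfold Spec_valid_starting_city1 valid_starting_city1 valid_starting_city1_alt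
  rcases Nat.eq_zero_or_pos fuel.length with h0 | hpos
  · rw [h0]
    rw [PySem.List.pyRange_one_eq_nil (a := 1) (by omega),
        PySem.List.pyRange_one_eq_nil (a := 0) (by omega)]
    rfl
  · have hA : (fuel.length : Int) = ((fuel.length - 1 : Nat) : Int) + 1 := by omega
    have hB : (fuel.length : Int) - 1 = ((fuel.length - 1 : Nat) : Int) := by omega
    simp only [hA, pvA_fold]
    simp only [add_sub_cancel_right, pvB_fold]
    have hh := pvSorted_head distances fuel mpg (fuel.length - 1)
    obtain ⟨t, ht⟩ : ∃ t, PySem.List.sorted (pvC distances fuel mpg (fuel.length - 1)) (fun c => c.1)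
        = ((pvMA distances fuel mpg (fuel.length - 1)).1, ((pvMA distances fuel mpg (fuel.length - 1)).2 : Int)) :: t := by
      cases hs : PySem.List.sorted (pvC distances fuel mpg (fuel.length - 1)) (fun c => c.1) with
      | nil => rw [hs] at hh; simp at hh
      | cons a t => rw [hs] at hh; simp at hh; exact ⟨t, by rw [hh]⟩
    rw [ht]
    simp [PySem.List.pyGetD, PySem.List.pyGet?, PySem.List.pyIdx?]
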